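-- pv_equiv track=rewrite | github.com/tyler569/mandelbrot | renderImage.py | map_image
-- ===== SOURCE A (Python) =====
-- def map_image(mandel):
-- 	png_list = [[]]
-- 	for i in mandel:
-- 		if i is None:
-- 			png_list.append([])
-- 		else:
-- 			png_list[-1].append(bool(i))
-- 	return png_list
-- ===== SOURCE B (Python) =====
-- def map_image(mandel):
--     seq = list(mandel)
--     delims = [i for i, x in enumerate(seq) if x is None]
--     out = []
--     prev = -1
--     for d in delims:
--         out.append([bool(x) for x in seq[prev + 1:d]])
--         prev = d
--     out.append([bool(x) for x in seq[prev + 1:]])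
--     return out
-- ===== Notes on version B (the rewrite author's own statement) =====
-- stated objective: alternative
-- what changed: B materializes the input, collects the indices of the None delimiters in one pass, then builds the result by slicing between consecutive delimiters, instead of A's single loop that mutates the last accumulator sublist.
import Mathlib
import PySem

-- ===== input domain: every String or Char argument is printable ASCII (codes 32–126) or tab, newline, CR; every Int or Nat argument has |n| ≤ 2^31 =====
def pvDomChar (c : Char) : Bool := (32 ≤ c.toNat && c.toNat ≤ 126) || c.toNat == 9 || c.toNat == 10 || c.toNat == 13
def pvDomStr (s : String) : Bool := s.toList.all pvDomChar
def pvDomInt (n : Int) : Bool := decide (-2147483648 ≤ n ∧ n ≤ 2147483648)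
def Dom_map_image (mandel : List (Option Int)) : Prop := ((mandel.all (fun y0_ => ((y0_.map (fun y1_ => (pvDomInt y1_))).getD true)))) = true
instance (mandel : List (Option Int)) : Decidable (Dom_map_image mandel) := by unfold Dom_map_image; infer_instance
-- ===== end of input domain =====

-- B builds the result by collecting None-delimiter indices and slicing between them, instead of
-- A's loop that mutates the last accumulator sublist; objective: alternative (same cost).

-- ===== PORT A =====
-- bool(i) for an int i (bool(None) is False)
def pvToBool (o : Option Int) : Bool :=
  match o with
  | none => false
  | some v => v != 0

-- one iteration of A's loop: append new [] on None, else append bool(i) to png_list[-1]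
def pvStepA (acc : List (List Bool)) (i : Option Int) : List (List Bool) :=
  match i with
  | none => acc ++ [[]]
  | some v => acc.dropLast ++ [acc.getLastD [] ++ [pvToBool (some v)]]

def map_image (mandel : List (Option Int)) : List (List Bool) :=
  mandel.foldl pvStepA [[]]

-- ===== PORT B =====
-- [i for i, x in enumerate(seq) if x is None], carrying the running index
def pvDelims : List (Option Int) → Nat → List Nat
  | [], _ => []
  | none :: t, i => i :: pvDelims t (i + 1)
  | some _ :: t, i => pvDelims t (i + 1)

-- the `for d in delims` loop; `start` is prev+1; seq[a:b] with 0 ≤ a ≤ b is (drop a).take (b-a)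
def pvBuildB (seq : List (Option Int)) : List Nat → Nat → List (List Bool)
  | [], start => [(seq.drop start).map pvToBool]
  | d :: rest, start => ((seq.drop start).take (d - start)).map pvToBool :: pvBuildB seq rest (d + 1)

def map_image_alt (mandel : List (Option Int)) : List (List Bool) :=
  pvBuildB mandel (pvDelims mandel 0) 0

-- ===== PRECONDITION & SPEC =====
def Spec_map_image (mandel : List (Option Int)) (out : List (List Bool)) : Prop := out = map_image_alt mandel
instance (mandel : List (Option Int)) (out : List (List Bool)) : Decidable (Spec_map_image mandel out) := by unfold Spec_map_image; infer_instance

-- ===== CLAIM (what is proved, stated in full; the proofs are below) =====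
def Claim_equal_map_image : Prop := ∀ (mandel : List (Option Int)), Dom_map_image mandel → Spec_map_image mandel (map_image mandel)

-- ===== LEMMAS AND PROOFS =====

-- canonical reference: split on None, segment count = #None + 1
def pvSplit : List (Option Int) → List (List Bool)
  | [] => [[]]
  | none :: t => [] :: pvSplit t
  | some v :: t =>
    match pvSplit t with
    | [] => [[pvToBool (some v)]]
    | h :: r => (pvToBool (some v) :: h) :: r

-- prepend c to the first segment
def pvGlue (c : List Bool) : List (List Bool) → List (List Bool)
  | [] => [c]
  | h :: r => (c ++ h) :: r

theorem pvSplit_ne_nil (l : List (Option Int)) : pvSplit l ≠ [] := by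
  cases l with
  | nil => simp [pvSplit]
  | cons x t =>
    cases x with
    | none => simp [pvSplit]
    | some v => simp only [pvSplit]; cases pvSplit t <;> simp

theorem pvFoldA_eq (l : List (Option Int)) :
    ∀ (acc : List (List Bool)) (c : List Bool),
      List.foldl pvStepA (acc ++ [c]) l = acc ++ pvGlue c (pvSplit l) := by
  induction l with
  | nil => intro acc c; simp [pvSplit, pvGlue]
  | cons x t ih =>
    intro acc c
    cases x with
    | none =>
      have : pvStepA (acc ++ [c]) none = (acc ++ [c]) ++ [[]] := by simp [pvStepA]
      simp only [List.foldl_cons, this, ih (acc ++ [c]) []]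
      cases h : pvSplit t with
      | nil => exact absurd h (pvSplit_ne_nil t)
      | cons hh r => simp [pvSplit, pvGlue, h]
    | some v =>
      have : pvStepA (acc ++ [c]) (some v) = acc ++ [c ++ [pvToBool (some v)]] := by
        simp [pvStepA]
      simp only [List.foldl_cons, this, ih acc (c ++ [pvToBool (some v)])]
      cases h : pvSplit t <;> simp [pvSplit, pvGlue, h]

theorem pvDelims_ge {t : List (Option Int)} {i d : Nat} {rest : List Nat}
    (h : pvDelims t i = d :: rest) : i ≤ d := by
  induction t generalizing i with
  | nil => simp [pvDelims] at h
  | cons x t ih =>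
    cases x with
    | none => simp [pvDelims] at h; omega
    | some v =>
      simp only [pvDelims] at h
      have := ih h; omega

theorem pvBuildB_eq (t : List (Option Int)) :
    ∀ (seq : List (Option Int)) (s : Nat), seq.drop s = t →
      pvBuildB seq (pvDelims t s) s = pvSplit t := by
  induction t with
  | nil => intro seq s h; simp [pvDelims, pvBuildB, pvSplit, h]
  | cons x t ih =>
    intro seq s h
    have htail : seq.drop (s + 1) = t := by
      rw [← List.tail_drop, h]; rfl
    cases x with
    | none =>
      simp only [pvDelims, pvBuildB, h, Nat.sub_self, List.take_zero, List.map_nil, pvSplit]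
      rw [ih seq (s + 1) htail]
    | some v =>
      simp only [pvDelims, pvSplit]
      have key : pvBuildB seq (pvDelims t (s + 1)) s =
          pvGlue [pvToBool (some v)] (pvBuildB seq (pvDelims t (s + 1)) (s + 1)) := by
        cases hd : pvDelims t (s + 1) with
        | nil => simp [pvBuildB, h, htail, pvGlue]
        | cons d rest =>
          have hge : s + 1 ≤ d := pvDelims_ge hd
          have htake : (seq.drop s).take (d - s) =
              some v :: (seq.drop (s + 1)).take (d - (s + 1)) := by
            rw [h, htail]
            have : d - s = (d - (s + 1)) + 1 := by omega
            rw [this, List.take_succ_cons]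
          simp [pvBuildB, htake, pvGlue]
      rw [key, ih seq (s + 1) htail]
      cases hsp : pvSplit t <;> simp [pvGlue]

-- ===== VERDICT (by name: the statement is the Claim_ definition above) =====
theorem map_image_spec : Claim_equal_map_image := by
  intro mandel _
  show map_image mandel = map_image_alt mandel
  have hA : map_image mandel = pvGlue [] (pvSplit mandel) := by
    have := pvFoldA_eq mandel [] []
    simpa [map_image] using this
  have hB : map_image_alt mandel = pvSplit mandel :=
    pvBuildB_eq mandel mandel 0 (by simp)
  rw [hA, hB]
  cases h : pvSplit mandel with
  | nil => exact absurd h (pvSplit_ne_nil mandel)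
  | cons hh r => simp [pvGlue]
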